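-- pv_equiv track=rewrite | github.com/prasadshirvandkar/Competitive_Prep | src/pythoncodes/strings/diff_string.py | diff_string
-- ===== SOURCE A (Python) =====
-- def diff_string(strs):
--     invalid = []
--     for st in strs:
--         if len(st) >= 2:
--             diff = ord(st[1]) - ord(st[0])
--             for i in range(2, len(st)):
--                 if ord(st[i]) - ord(st[i - 1]) != diff:
--                     invalid.append(st)
--                     break
--
--     return invalid
-- ===== SOURCE B (Python) =====
-- def diff_string(strs):
--     return [st for st in strs
--             if len({ord(b) - ord(a) for a, b in zip(st, st[1:])}) > 1]
-- ===== Notes on version B (the rewrite author's own statement) =====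
-- stated objective: idiomatic
-- what changed: Replaces the index-based inner scan with an early break by a comprehension that builds the set of consecutive char-code differences per string and keeps the string when that set has more than one distinct value.
import Mathlib
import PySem

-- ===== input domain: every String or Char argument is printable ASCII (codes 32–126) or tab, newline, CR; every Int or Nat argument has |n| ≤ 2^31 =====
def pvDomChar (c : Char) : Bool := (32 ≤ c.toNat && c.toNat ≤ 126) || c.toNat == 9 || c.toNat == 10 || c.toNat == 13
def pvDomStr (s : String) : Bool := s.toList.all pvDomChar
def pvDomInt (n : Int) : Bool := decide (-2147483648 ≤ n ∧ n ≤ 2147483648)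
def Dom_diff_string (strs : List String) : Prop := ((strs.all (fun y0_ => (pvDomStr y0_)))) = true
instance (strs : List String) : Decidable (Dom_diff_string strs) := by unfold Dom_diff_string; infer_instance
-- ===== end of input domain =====

-- B replaces A's index loop with early break by a per-string set of consecutive
-- char-code differences, kept when it has more than one distinct value (idiomatic; same cost).


-- ===== PORT A =====
-- inner 'for i in range(2, len(st)): if …: break' — returns whether the break fired
def aLoop (cs : List Char) (diff : Int) (i : Nat) : Bool :=
  if _h : i < cs.length then
    if ((cs.getD i default).toNat : Int) - ((cs.getD (i - 1) default).toNat : Int) ≠ diff then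
      true
    else aLoop cs diff (i + 1)
  else false
termination_by cs.length - i

def diff_string (strs : List String) : List String :=
  strs.foldl (fun invalid st =>
    let cs := st.toList
    if 2 ≤ cs.length then
      let diff : Int := ((cs.getD 1 default).toNat : Int) - ((cs.getD 0 default).toNat : Int)
      if aLoop cs diff 2 then invalid ++ [st] else invalid
    else invalid) []

-- ===== PORT B =====
-- [ord(b) - ord(a) for a, b in zip(st, st[1:])]
def pairDiffs (cs : List Char) : List Int :=
  (cs.zip cs.tail).map (fun p => (p.2.toNat : Int) - (p.1.toNat : Int))

def diff_string_alt (strs : List String) : List String :=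
  strs.filter (fun st => decide (1 < (PySem.Set.ofList (pairDiffs st.toList)).length))

-- ===== PRECONDITION & SPEC =====
def Spec_diff_string (strs : List String) (out : List String) : Prop := out = diff_string_alt strs
instance (strs : List String) (out : List String) : Decidable (Spec_diff_string strs out) := by unfold Spec_diff_string; infer_instance

-- ===== CLAIM (what is proved, stated in full; the proofs are below) =====
def Claim_equal_diff_string : Prop := ∀ (strs : List String), Dom_diff_string strs → Spec_diff_string strs (diff_string strs)

-- ===== LEMMAS AND PROOFS =====

-- A's per-string test, as a predicate
def predA (st : String) : Bool :=
  let cs := st.toList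
  if 2 ≤ cs.length then
    aLoop cs (((cs.getD 1 default).toNat : Int) - ((cs.getD 0 default).toNat : Int)) 2
  else false

lemma length_pairDiffs (cs : List Char) : (pairDiffs cs).length = cs.length - 1 := by
  simp [pairDiffs]

lemma getElem_pairDiffs (cs : List Char) (k : Nat) (h : k < (pairDiffs cs).length) :
    (pairDiffs cs)[k] = ((cs[k + 1]'(by rw [length_pairDiffs] at h; omega)).toNat : Int)
      - ((cs[k]'(by rw [length_pairDiffs] at h; omega)).toNat : Int) := by
  simp [pairDiffs, List.getElem_zip, List.getElem_tail]

lemma aLoop_eq_any (cs : List Char) (d : Int) (i : Nat) (hi : 1 ≤ i) :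
    aLoop cs d i = ((pairDiffs cs).drop (i - 1)).any (fun x => x ≠ d) := by
  by_cases h : i < cs.length
  · have hk : i - 1 < (pairDiffs cs).length := by rw [length_pairDiffs]; omega
    have hdrop : (pairDiffs cs).drop (i - 1)
        = (pairDiffs cs)[i - 1] :: (pairDiffs cs).drop (i - 1 + 1) :=
      List.drop_eq_getElem_cons hk
    have hget : (pairDiffs cs)[i - 1]
        = ((cs.getD i default).toNat : Int) - ((cs.getD (i - 1) default).toNat : Int) := by
      rw [getElem_pairDiffs cs (i - 1) hk]
      have h1 : i - 1 + 1 = i := by omega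
      rw [List.getD_eq_getElem cs default (by omega : i < cs.length),
          List.getD_eq_getElem cs default (by omega : i - 1 < cs.length)]
      congr 1 <;> · simp [h1]
    have ih := aLoop_eq_any cs d (i + 1) (by omega)
    rw [aLoop]
    simp only [h, dif_pos, hdrop, List.any_cons]
    have h2 : i + 1 - 1 = i - 1 + 1 := by omega
    rw [ih, h2, hget]
    by_cases hne : ((cs.getD i default).toNat : Int) - ((cs.getD (i - 1) default).toNat : Int) ≠ d
    · simp [hne]
    · simp at hne
      simp [hne]
  · have : (pairDiffs cs).drop (i - 1) = [] := by
      apply List.drop_eq_nil_of_le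
      rw [length_pairDiffs]; omega
    rw [aLoop]
    simp [h, this]
termination_by cs.length - i

lemma set_card_gt_one (d : Int) (t : List Int) :
    decide (1 < (PySem.Set.ofList (d :: t)).length) = t.any (fun x => x ≠ d) := by
  rw [PySem.Set.ofList_cons]
  rcases hempty : PySem.Set.discard (PySem.Set.ofList t) d with _ | ⟨y, ys⟩
  · have hall : ∀ x ∈ t, x = d := by
      intro x hx
      by_contra hne
      have hmem : x ∈ PySem.Set.discard (PySem.Set.ofList t) d := by
        rw [PySem.Set.mem_discard]
        exact ⟨(PySem.Set.mem_ofList _ _).2 hx, hne⟩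
      rw [hempty] at hmem
      simp at hmem
    simp
    exact hall
  · have hy : y ∈ PySem.Set.discard (PySem.Set.ofList t) d := by rw [hempty]; simp
    rw [PySem.Set.mem_discard, PySem.Set.mem_ofList] at hy
    simp
    exact ⟨y, hy.1, hy.2⟩

lemma pred_eq (st : String) :
    predA st = decide (1 < (PySem.Set.ofList (pairDiffs st.toList)).length) := by
  unfold predA
  rcases hcs : st.toList with _ | ⟨c0, _ | ⟨c1, rest⟩⟩
  · simp [pairDiffs, PySem.Set.ofList_nil]
  · simp [pairDiffs, PySem.Set.ofList_nil]
  · have hlen : 2 ≤ (c0 :: c1 :: rest).length := by simp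
    simp only [hlen, if_pos]
    have hpd : pairDiffs (c0 :: c1 :: rest)
        = ((c1.toNat : Int) - (c0.toNat : Int)) :: pairDiffs (c1 :: rest) := by
      simp [pairDiffs]
    rw [aLoop_eq_any _ _ 2 (by omega), hpd, set_card_gt_one]
    simp [List.getD]

lemma foldl_eq (strs : List String) (acc : List String) :
    strs.foldl (fun invalid st =>
      let cs := st.toList
      if 2 ≤ cs.length then
        let diff : Int := ((cs.getD 1 default).toNat : Int) - ((cs.getD 0 default).toNat : Int)
        if aLoop cs diff 2 then invalid ++ [st] else invalid
      else invalid) acc = acc ++ strs.filter predA := by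
  induction strs generalizing acc with
  | nil => simp
  | cons st rest ih =>
    rw [List.foldl_cons]
    have hstep : (let cs := st.toList
        if 2 ≤ cs.length then
          let diff : Int := ((cs.getD 1 default).toNat : Int) - ((cs.getD 0 default).toNat : Int)
          if aLoop cs diff 2 then acc ++ [st] else acc
        else acc) = if predA st then acc ++ [st] else acc := by
      unfold predA
      simp only
      split_ifs <;> simp_all
    rw [hstep]
    cases hp : predA st with
    | false =>
      rw [ih, List.filter_cons, hp]
      simp
    | true =>
      rw [ih, List.filter_cons, hp]
      simp

-- ===== VERDICT (by name: the statement is the Claim_ definition above) =====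
theorem diff_string_spec : Claim_equal_diff_string := by
  intro strs _hdom
  unfold Spec_diff_string diff_string diff_string_alt
  rw [foldl_eq]
  simp only [List.nil_append]
  exact List.filter_congr (fun st _ => pred_eq st)
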